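-- pv_equiv track=rewrite | github.com/firecharm/Facebook_FaceRec | Data_Prep.py | shrinkage
-- ===== SOURCE A (Python) =====
-- def shrinkage(data_addrs,num_frames):
--     folder_dict = {}
--     addrs_list = []
--     for i in data_addrs:
--         folder = folder = i.split("/")[-3]+ "/"+ i.split("/")[-2]
--         # Set initial number to be 0
--         if folder not in folder_dict.keys():
--             folder_dict[folder] = 0
--         # Updating the num of frames till meet desired
--         if folder_dict[folder] < num_frames:
--             addrs_list.append(i)
--             folder_dict[folder] += 1
--
--     return(addrs_list)
-- ===== SOURCE B (Python) =====
-- def shrinkage(data_addrs, num_frames):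
--     # Group-select-sort-gather: group original indices by folder key, take the
--     # first num_frames indices per group, sort them, and gather the addresses.
--     keys = [a.split("/")[-3] + "/" + a.split("/")[-2] for a in data_addrs]
--     take = max(0, num_frames)
--     picked = []
--     for k in dict.fromkeys(keys):
--         idxs = [i for i, kk in enumerate(keys) if kk == k]
--         picked.extend(idxs[:take])
--     picked.sort()
--     return [data_addrs[i] for i in picked]
-- ===== Notes on version B (the rewrite author's own statement) =====
-- stated objective: alternative
-- what changed: Replaces A's single streaming pass with a dict of per-folder running counters by a group-select-sort-gather decomposition: group original indices by folder key (dict.fromkeys for distinct keys), take the first num_frames indices of each group, sort the collected indices and gather the addresses, so the original order is restored by the final sort instead of being preserved by streaming.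
import Mathlib
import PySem

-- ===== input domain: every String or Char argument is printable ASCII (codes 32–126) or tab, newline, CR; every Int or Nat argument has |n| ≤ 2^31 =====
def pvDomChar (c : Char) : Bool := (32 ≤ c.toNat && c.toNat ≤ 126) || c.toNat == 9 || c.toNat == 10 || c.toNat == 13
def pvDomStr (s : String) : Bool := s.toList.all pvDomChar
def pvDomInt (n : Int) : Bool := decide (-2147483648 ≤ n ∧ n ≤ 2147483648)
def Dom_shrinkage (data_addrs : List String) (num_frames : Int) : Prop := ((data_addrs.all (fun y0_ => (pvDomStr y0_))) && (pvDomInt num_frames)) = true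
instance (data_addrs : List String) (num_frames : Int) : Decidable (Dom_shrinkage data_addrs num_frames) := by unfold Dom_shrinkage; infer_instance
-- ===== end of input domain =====

-- ===== PORT A =====
-- B replaces A's streaming dict-of-counters with a group-select-sort-gather decomposition
-- (group indices by folder key, take the first num_frames per group, sort, gather);
-- same return value on every path list whose addresses have >= 3 '/'-separated components.
-- i.split("/")  (sep nonempty, exact)
def pvParts (s : String) : List String := (PySem.Str.split? s "/").getD []

-- the folder key both Pythons compute: i.split("/")[-3] + "/" + i.split("/")[-2]
-- (getD "" is never reached under Pre_; outside Pre_ both Pythons raise IndexError here)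
def pvKey (i : String) : String :=
  (PySem.List.pyGet? (pvParts i) (-3)).getD "" ++ "/" ++ (PySem.List.pyGet? (pvParts i) (-2)).getD ""

-- the loop body of A, verbatim
def pvStepA (num_frames : Int) (st : PySem.Dict String Int × List String) (i : String) :
    PySem.Dict String Int × List String :=
  let folder := pvKey i
  let fd := if st.1.contains folder then st.1 else st.1.insert folder 0
  if fd.getD folder 0 < num_frames then (fd.insert folder (fd.getD folder 0 + 1), st.2 ++ [i])
  else (fd, st.2)

def shrinkage (data_addrs : List String) (num_frames : Int) : List String :=
  (data_addrs.foldl (pvStepA num_frames) (PySem.Dict.empty, [])).2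

-- ===== PORT B =====
-- Source B step for step: keys list, take = max(0, num_frames), for each distinct key
-- (dict.fromkeys = PySem.List.dedup) collect the first `take` original indices,
-- sort the collected indices, gather (data_addrs[i] is always in range: pyGetD default unreachable).
def shrinkage_alt (data_addrs : List String) (num_frames : Int) : List String :=
  let keys := data_addrs.map pvKey
  let take := max 0 num_frames
  let picked := (PySem.List.dedup keys).flatMap (fun k =>
    PySem.List.slice ((PySem.List.enumerate keys).filterMap
      (fun p => if p.2 == k then some p.1 else none)) none (some take))
  (PySem.List.sorted picked (fun x => x) false).map (fun i => PySem.List.pyGetD data_addrs i "")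

-- ===== PRECONDITION & SPEC =====
-- Pre_ excludes exactly the inputs on which A raises IndexError: an address with fewer than
-- three '/'-separated components makes i.split("/")[-3] raise.
def Pre_shrinkage (data_addrs : List String) (num_frames : Int) : Prop :=
  ∀ s ∈ data_addrs, 3 ≤ (pvParts s).length
instance (data_addrs : List String) (num_frames : Int) : Decidable (Pre_shrinkage data_addrs num_frames) := by unfold Pre_shrinkage; infer_instance

def pvWitness_shrinkage : List String × Int := (["a/b/c", "a/b/d", "x/y/z"], 1)

def Spec_shrinkage (data_addrs : List String) (num_frames : Int) (out : List String) : Prop := out = shrinkage_alt data_addrs num_frames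
instance (data_addrs : List String) (num_frames : Int) (out : List String) : Decidable (Spec_shrinkage data_addrs num_frames out) := by unfold Spec_shrinkage; infer_instance

-- ===== CLAIM (what is proved, stated in full; the proofs are below) =====
def Claim_equal_shrinkage : Prop := ∀ (data_addrs : List String) (num_frames : Int), Dom_shrinkage data_addrs num_frames → Pre_shrinkage data_addrs num_frames → Spec_shrinkage data_addrs num_frames (shrinkage data_addrs num_frames)

-- ===== LEMMAS AND PROOFS =====

-- the common abstraction: keep each (index, element) pair iff its key occurred < nf times
-- before (h = keys seen so far)
def pvSelE (nf : Int) : List (Int × String) → List String → List (Int × String)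
  | [], _ => []
  | p :: t, h => (if ((h.count (pvKey p.2) : Int) < nf) then [p] else []) ++ pvSelE nf t (h ++ [pvKey p.2])

-- ---- A side: the streaming fold selects exactly pvSelE's second components ----
lemma pvA_loop (nf : Int) :
    ∀ (l : List (Int × String)) (d : PySem.Dict String Int) (acc h : List String),
      (∀ s, d.getD s 0 = min ((h.count s : Int)) (max nf 0)) →
      ((l.map Prod.snd).foldl (pvStepA nf) (d, acc)).2 = acc ++ (pvSelE nf l h).map Prod.snd := by
  intro l
  induction l with
  | nil => intro d acc h _; simp [pvSelE]
  | cons q t ih =>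
    intro d acc h hinv
    set a := q.2 with ha
    have hfd : ∀ s, (if d.contains (pvKey a) then d else d.insert (pvKey a) 0).getD s 0
        = d.getD s 0 := by
      intro s
      by_cases hc : d.contains (pvKey a)
      · simp [hc]
      · simp only [hc, if_neg, Bool.false_eq_true, not_false_iff]
        by_cases hs : s = pvKey a
        · subst hs
          rw [PySem.Dict.getD_insert_self, PySem.Dict.getD_of_not_contains d 0 (by simpa using hc)]
        · rw [PySem.Dict.getD_insert_of_ne d 0 0 hs]
    simp only [List.map_cons, List.foldl_cons, pvSelE]
    show (List.foldl (pvStepA nf)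
        (let folder := pvKey a;
         let fd := if d.contains folder then d else d.insert folder 0;
         if fd.getD folder 0 < nf then (fd.insert folder (fd.getD folder 0 + 1), acc ++ [a])
         else (fd, acc)) (t.map Prod.snd)).2 = _
    simp only [hfd, hinv (pvKey a)]
    have hgrow : ∀ s : String, s ≠ pvKey a → (h ++ [pvKey a]).count s = h.count s := by
      intro s hs
      simp [List.count_append, Ne.symm hs]
    have hgrow' : (h ++ [pvKey a]).count (pvKey a) = h.count (pvKey a) + 1 := by
      simp [List.count_append]
    by_cases hlt : min ((h.count (pvKey a) : Int)) (max nf 0) < nf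
    · rw [if_pos hlt]
      have hsel : ((h.count (pvKey a) : Int)) < nf := by omega
      have hinv' : ∀ s, ((if d.contains (pvKey a) then d else d.insert (pvKey a) 0).insert
          (pvKey a) (min ((h.count (pvKey a) : Int)) (max nf 0) + 1)).getD s 0
          = min (((h ++ [pvKey a]).count s : Int)) (max nf 0) := by
        intro s
        by_cases hs : s = pvKey a
        · subst hs
          rw [PySem.Dict.getD_insert_self, hgrow']
          push_cast
          omega
        · rw [PySem.Dict.getD_insert_of_ne _ _ _ hs, hfd s, hinv s, hgrow s hs]
      rw [ih _ (acc ++ [a]) (h ++ [pvKey a]) hinv']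
      rw [if_pos hsel]
      simp [ha]
    · rw [if_neg hlt]
      have hsel : ¬ ((h.count (pvKey a) : Int)) < nf := by omega
      have hinv' : ∀ s, (if d.contains (pvKey a) then d else d.insert (pvKey a) 0).getD s 0
          = min (((h ++ [pvKey a]).count s : Int)) (max nf 0) := by
        intro s
        by_cases hs : s = pvKey a
        · subst hs
          rw [hfd _, hinv _, hgrow']
          push_cast
          omega
        · rw [hfd s, hinv s, hgrow s hs]
      rw [ih _ acc (h ++ [pvKey a]) hinv']
      rw [if_neg hsel]
      simp [ha]

lemma pvEnum_map_snd : ∀ (l : List String) (j : Int),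
    (PySem.List.enumerate l j).map Prod.snd = l := by
  intro l
  induction l with
  | nil => intro j; simp [PySem.List.enumerate_nil]
  | cons a t ih => intro j; rw [PySem.List.enumerate_cons]; simp [ih]

lemma shrinkage_eq_sel (data_addrs : List String) (nf : Int) :
    shrinkage data_addrs nf
      = (pvSelE nf (PySem.List.enumerate data_addrs 0) []).map Prod.snd := by
  have h0 : ∀ s : String, (PySem.Dict.empty : PySem.Dict String Int).getD s 0
      = min ((([] : List String).count s : Int)) (max nf 0) := by
    intro s; simp [PySem.Dict.getD_empty]
  have := pvA_loop nf (PySem.List.enumerate data_addrs 0) PySem.Dict.empty [] [] h0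
  rw [pvEnum_map_snd] at this
  simpa [shrinkage] using this

-- ---- B side ----

-- enumerate over the mapped key list, with the extractor fused: the indices of pairs with key k
lemma pvFM (k : String) : ∀ (l : List String) (j : Int),
    (PySem.List.enumerate (l.map pvKey) j).filterMap
        (fun p => if p.2 == k then some p.1 else none)
      = ((PySem.List.enumerate l j).filter (fun p => pvKey p.2 == k)).map Prod.fst := by
  intro l
  induction l with
  | nil => intro j; simp [PySem.List.enumerate_nil]
  | cons a t ih =>
    intro j
    rw [List.map_cons, PySem.List.enumerate_cons, PySem.List.enumerate_cons,
        List.filterMap_cons, List.filter_cons]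
    by_cases h : pvKey a == k
    · rw [if_pos h, if_pos h, List.map_cons, ih]
    · rw [if_neg h, if_neg h, ih]

-- per-key selection: the selected pairs with key k are the first (take - already seen) of
-- all pairs with key k
lemma pvSel_per_key (nf : Int) (k : String) :
    ∀ (E : List (Int × String)) (h : List String),
      ((pvSelE nf E h).filter (fun p => pvKey p.2 == k))
        = (E.filter (fun p => pvKey p.2 == k)).take ((max 0 nf).toNat - h.count k) := by
  intro E
  induction E with
  | nil => intro h; simp [pvSelE]
  | cons p t ih =>
    intro h
    have htk : ((max 0 nf).toNat : Int) = max 0 nf := Int.toNat_of_nonneg (le_max_left _ _)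
    by_cases hk : pvKey p.2 = k
    · have hcount : (h ++ [pvKey p.2]).count k = h.count k + 1 := by
        simp [List.count_append, hk]
      by_cases hlt : ((h.count (pvKey p.2) : Int)) < nf
      · have htake : (max 0 nf).toNat - h.count k = ((max 0 nf).toNat - (h.count k + 1)) + 1 := by
          have : (h.count k : Int) < max 0 nf := by rw [← hk]; omega
          omega
        rw [show pvSelE nf (p :: t) h = p :: pvSelE nf t (h ++ [pvKey p.2]) by
              simp [pvSelE, hlt],
            List.filter_cons_of_pos (by simp [hk]), List.filter_cons_of_pos (by simp [hk]),
            htake, List.take_succ_cons, ih (h ++ [pvKey p.2]), hcount]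
      · have htake : (max 0 nf).toNat - h.count k = 0 := by
          have : ¬ (h.count k : Int) < max 0 nf := by rw [← hk]; omega
          omega
        have htake' : (max 0 nf).toNat - (h ++ [pvKey p.2]).count k = 0 := by
          rw [hcount]; omega
        rw [show pvSelE nf (p :: t) h = pvSelE nf t (h ++ [pvKey p.2]) by
              simp [pvSelE, hlt],
            ih (h ++ [pvKey p.2]), htake, htake', List.take_zero, List.take_zero]
    · have hcount : (h ++ [pvKey p.2]).count k = h.count k := by
        simp [List.count_append, hk]
      have hfilter : ∀ l : List (Int × String), (p :: l).filter (fun q => pvKey q.2 == k)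
          = l.filter (fun q => pvKey q.2 == k) := by
        intro l; exact List.filter_cons_of_neg (by simp [hk])
      by_cases hlt : ((h.count (pvKey p.2) : Int)) < nf
      · rw [show pvSelE nf (p :: t) h = p :: pvSelE nf t (h ++ [pvKey p.2]) by
              simp [pvSelE, hlt],
            hfilter, hfilter, ih (h ++ [pvKey p.2]), hcount]
      · rw [show pvSelE nf (p :: t) h = pvSelE nf t (h ++ [pvKey p.2]) by
              simp [pvSelE, hlt],
            hfilter, ih (h ++ [pvKey p.2]), hcount]

-- a list is a permutation of the concatenation of its filters over a nodup covering key list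
lemma pvPartition_perm :
    ∀ (K : List String) (L : List (Int × String)), K.Nodup → (∀ p ∈ L, pvKey p.2 ∈ K) →
      (K.flatMap (fun k => L.filter (fun p => pvKey p.2 == k))).Perm L := by
  intro K
  induction K with
  | nil =>
    intro L _ hcov
    cases L with
    | nil => simp
    | cons a t => exact absurd (hcov a (by simp)) (by simp)
  | cons k K' ih =>
    intro L hnd hcov
    have hnd' : K'.Nodup := (List.nodup_cons.mp hnd).2
    have hknotin : k ∉ K' := (List.nodup_cons.mp hnd).1
    have hL2cov : ∀ p ∈ L.filter (fun p => !(pvKey p.2 == k)), pvKey p.2 ∈ K' := by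
      intro p hp
      have hmem := List.mem_filter.mp hp
      have h2 : pvKey p.2 ≠ k := by simpa using hmem.2
      have h3 := hcov p hmem.1
      simp only [List.mem_cons] at h3
      tauto
    have hsame : ∀ k' ∈ K', L.filter (fun p => pvKey p.2 == k')
        = (L.filter (fun p => !(pvKey p.2 == k))).filter (fun p => pvKey p.2 == k') := by
      intro k' hk'
      rw [List.filter_filter]
      apply List.filter_congr
      intro p _
      by_cases h : pvKey p.2 = k'
      · have hne : pvKey p.2 ≠ k := by
          intro hkk
          have hkk' : k' = k := by rw [← h, hkk]
          exact hknotin (hkk' ▸ hk')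
        simp [h]
        exact fun hkk => hne (h.trans hkk)
      · simp [h]
    have hflat : K'.flatMap (fun k' => L.filter (fun p => pvKey p.2 == k'))
        = K'.flatMap (fun k' => (L.filter (fun p => !(pvKey p.2 == k))).filter (fun p => pvKey p.2 == k')) := by
      rw [List.flatMap_def, List.flatMap_def, List.map_congr_left hsame]
    have hperm : (K'.flatMap (fun k' => L.filter (fun p => pvKey p.2 == k'))).Perm
        (L.filter (fun p => !(pvKey p.2 == k))) := by
      rw [hflat]
      exact ih (L.filter (fun p => !(pvKey p.2 == k))) hnd' hL2cov
    rw [List.flatMap_cons]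
    exact (hperm.append_left _).trans (List.filter_append_perm _ L)

-- pvSelE is a sublist of its input
lemma pvSelE_sublist (nf : Int) :
    ∀ (E : List (Int × String)) (h : List String), (pvSelE nf E h).Sublist E := by
  intro E
  induction E with
  | nil => intro h; simp [pvSelE]
  | cons p t ih =>
    intro h
    by_cases hlt : ((h.count (pvKey p.2) : Int)) < nf
    · simpa [pvSelE, if_pos hlt] using (ih (h ++ [pvKey p.2])).cons₂ p
    · simpa [pvSelE, if_neg hlt] using (ih (h ++ [pvKey p.2])).cons p

set_option maxHeartbeats 1600000 in
lemma shrinkage_alt_eq_sel (data_addrs : List String) (nf : Int) :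
    shrinkage_alt data_addrs nf
      = (pvSelE nf (PySem.List.enumerate data_addrs 0) []).map Prod.snd := by
  have htk : ((max 0 nf).toNat : Int) = max 0 nf := Int.toNat_of_nonneg (le_max_left _ _)
  have hslice : ∀ l : List Int,
      PySem.List.slice l none (some (max 0 nf)) = l.take (max 0 nf).toNat := by
    intro l
    conv_lhs => rw [← htk]
    rw [PySem.List.slice_to_natCast]
  have hpick : ∀ k : String,
      (((PySem.List.enumerate data_addrs 0).filter (fun p => pvKey p.2 == k)).map Prod.fst).take
          (max 0 nf).toNat
        = ((pvSelE nf (PySem.List.enumerate data_addrs 0) []).filter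
            (fun p => pvKey p.2 == k)).map Prod.fst := by
    intro k
    rw [← List.map_take]
    have := pvSel_per_key nf k (PySem.List.enumerate data_addrs 0) []
    simp only [List.count_nil, Nat.sub_zero] at this
    rw [this]
  have hmemaddr : ∀ p ∈ pvSelE nf (PySem.List.enumerate data_addrs 0) [], p.2 ∈ data_addrs := by
    intro p hp
    have hpE := (pvSelE_sublist nf (PySem.List.enumerate data_addrs 0) []).subset hp
    rw [PySem.List.mem_enumerate_iff] at hpE
    obtain ⟨m, hm, rfl⟩ := hpE
    simp
  have hperm : ((PySem.List.dedup (data_addrs.map pvKey)).flatMap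
      (fun k => (pvSelE nf (PySem.List.enumerate data_addrs 0) []).filter
        (fun p => pvKey p.2 == k))).Perm (pvSelE nf (PySem.List.enumerate data_addrs 0) []) := by
    apply pvPartition_perm
    · exact PySem.List.nodup_dedup _
    · intro p hp
      rw [PySem.List.mem_dedup]
      exact List.mem_map_of_mem (hmemaddr p hp)
  have hpair : ((pvSelE nf (PySem.List.enumerate data_addrs 0) []).map Prod.fst).Pairwise
      (fun a b => a < b) := by
    rw [List.pairwise_map]
    exact (PySem.List.pairwise_lt_enumerate data_addrs 0).sublist
      (pvSelE_sublist nf (PySem.List.enumerate data_addrs 0) [])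
  have hsorted : PySem.List.sorted
      ((PySem.List.dedup (data_addrs.map pvKey)).flatMap
        (fun k => ((pvSelE nf (PySem.List.enumerate data_addrs 0) []).filter
          (fun p => pvKey p.2 == k)).map Prod.fst)) (fun x => x) false
      = (pvSelE nf (PySem.List.enumerate data_addrs 0) []).map Prod.fst := by
    apply PySem.List.sorted_eq_of_perm_of_pairwise_lt
    · rw [← List.map_flatMap]
      exact (hperm.map Prod.fst).symm
    · exact hpair
  have hgather : ∀ p ∈ pvSelE nf (PySem.List.enumerate data_addrs 0) [],
      PySem.List.pyGetD data_addrs p.1 "" = p.2 := by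
    intro p hp
    have hpE := (pvSelE_sublist nf (PySem.List.enumerate data_addrs 0) []).subset hp
    rw [PySem.List.mem_enumerate_iff] at hpE
    obtain ⟨m, hm, rfl⟩ := hpE
    simp [PySem.List.pyGetD_natCast, List.getD_eq_getElem?_getD, List.getElem?_eq_getElem hm]
  simp only [shrinkage_alt, pvFM, hslice, hpick, hsorted, List.map_map]
  apply List.map_congr_left
  intro p hp
  exact hgather p hp

-- ===== VERDICT (by name: the statement is the Claim_ definition above) =====
theorem shrinkage_spec : Claim_equal_shrinkage := by
  intro data_addrs num_frames _ _
  unfold Spec_shrinkage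
  rw [shrinkage_eq_sel, shrinkage_alt_eq_sel]
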